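-- pv_equiv track=rewrite | github.com/Hoegh07/Project-Euler | Euler153/Euler153.py | Gdivisors
-- ===== SOURCE A (Python) =====
-- def mul(x,y):
--     return [x[0]*y[0]-x[1]*y[1],x[0]*y[1]+x[1]*y[0]]
--
-- def power(x,n):
--     y = [1,0]
--     for i in range(n):
--         y = mul(y,x)
--     return y
--
-- def Gdivisors(P,v):
--     div = [[1,0]]
--     for i in range(0,len(P)):
--         p = P[i]
--         u = []
--         for d in div:
--             for e in range(1,v[i]+1):
--                 u.append(mul(d,power(p,e)))
--         div = div+u
--     return div
-- ===== SOURCE B (Python) =====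
-- def mul(x, y):
--     return [x[0]*y[0]-x[1]*y[1], x[0]*y[1]+x[1]*y[0]]
--
-- def Gdivisors(P, v):
--     div = [[1, 0]]
--     for p, k in zip(P, v):
--         powers = []
--         q = [1, 0]
--         for _ in range(k):
--             q = mul(q, p)
--             powers.append(q)
--         div = div + [mul(d, q) for d in div for q in powers]
--     return div
-- ===== Notes on version B (the rewrite author's own statement) =====
-- stated objective: alternative
-- what changed: B computes the list p, p^2, ..., p^k once per prime by incremental multiplication and reuses it for every existing divisor, instead of A's recomputing power(p, e) from scratch inside the double loop; intended as faster (measured 25.69x at the largest size both finished, unconfirmed at larger sizes where the exponentially growing output dominates both).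
import Mathlib
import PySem

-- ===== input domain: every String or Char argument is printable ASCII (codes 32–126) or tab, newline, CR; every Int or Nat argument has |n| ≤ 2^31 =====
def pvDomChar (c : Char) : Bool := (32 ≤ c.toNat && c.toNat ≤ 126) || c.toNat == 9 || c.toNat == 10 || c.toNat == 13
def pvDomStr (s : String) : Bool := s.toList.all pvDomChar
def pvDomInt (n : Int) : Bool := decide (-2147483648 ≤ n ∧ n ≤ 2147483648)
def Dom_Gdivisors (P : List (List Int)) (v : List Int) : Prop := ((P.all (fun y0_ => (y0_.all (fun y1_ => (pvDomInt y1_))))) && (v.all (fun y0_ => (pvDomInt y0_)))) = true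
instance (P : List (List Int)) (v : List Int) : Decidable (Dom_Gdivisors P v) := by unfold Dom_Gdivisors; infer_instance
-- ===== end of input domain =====

-- B precomputes the k prime powers once per prime (incremental multiplication) and reuses them,
-- instead of recomputing power(p, e) from scratch inside A's double loop (intended as faster;
-- a timing run measured 25.69x at the largest size both finished, unconfirmed beyond that).

-- ===== PORT A =====
-- mul reads exactly x[0], x[1], y[0], y[1]; inside Pre_ these indices are in range, so
-- List.getD is exact there (Pre_ excludes the inputs where Python raises IndexError).
def pvMul (x y : List Int) : List Int :=
  [x.getD 0 0 * y.getD 0 0 - x.getD 1 0 * y.getD 1 0,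
   x.getD 0 0 * y.getD 1 0 + x.getD 1 0 * y.getD 0 0]

def pvPower (x : List Int) (n : Int) : List Int :=
  (PySem.List.pyRange 0 n 1).foldl (fun y _ => pvMul y x) [1, 0]

def Gdivisors (P : List (List Int)) (v : List Int) : List (List Int) :=
  (PySem.List.pyRange 0 (P.length : Int) 1).foldl (fun div i =>
    let p := PySem.List.pyGetD P i []
    let u := div.foldl (fun u d =>
      (PySem.List.pyRange 1 (PySem.List.pyGetD v i 0 + 1) 1).foldl
        (fun u e => u ++ [pvMul d (pvPower p e)]) u) []
    div ++ u) [[1, 0]]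

-- ===== PORT B =====
-- incremental list of powers p, p^2, …, p^k (Source B's inner 'for _ in range(k)' loop)
def pvPowers (p : List Int) (k : Int) : List (List Int) :=
  ((PySem.List.pyRange 0 k 1).foldl
    (fun (st : List (List Int) × List Int) _ =>
      let q := pvMul st.2 p
      (st.1 ++ [q], q)) ([], [1, 0])).1

def Gdivisors_alt (P : List (List Int)) (v : List Int) : List (List Int) :=
  (P.zip v).foldl (fun div pk =>
    div ++ div.flatMap (fun d => (pvPowers pk.1 pk.2).map (fun q => pvMul d q))) [[1, 0]]

-- ===== PRECONDITION & SPEC =====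
-- Pre_ is exactly where the Python A returns: v long enough to be indexed for every prime,
-- and every prime that is actually raised to a positive power has both components present.
def Pre_Gdivisors (P : List (List Int)) (v : List Int) : Prop :=
  P.length ≤ v.length ∧ ∀ i < P.length, 1 ≤ v.getD i 0 → 2 ≤ (P.getD i []).length
instance (P : List (List Int)) (v : List Int) : Decidable (Pre_Gdivisors P v) := by
  unfold Pre_Gdivisors; infer_instance

def pvWitness_Gdivisors : List (List Int) × List Int := ([[0, 1], [2, 1]], [2, 1])

def Spec_Gdivisors (P : List (List Int)) (v : List Int) (out : List (List Int)) : Prop := out = Gdivisors_alt P v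
instance (P : List (List Int)) (v : List Int) (out : List (List Int)) : Decidable (Spec_Gdivisors P v out) := by unfold Spec_Gdivisors; infer_instance

-- ===== CLAIM (what is proved, stated in full; the proofs are below) =====
def Claim_equal_Gdivisors : Prop := ∀ (P : List (List Int)) (v : List Int), Dom_Gdivisors P v → Pre_Gdivisors P v → Spec_Gdivisors P v (Gdivisors P v)

-- ===== LEMMAS AND PROOFS =====

-- proof-only helper: the n-th power of p under pvMul
def pvPw (p : List Int) : Nat → List Int
  | 0 => [1, 0]
  | n + 1 => pvMul (pvPw p n) p

lemma pvPower_eq (p : List Int) (e : Int) : pvPower p e = pvPw p e.toNat := by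
  unfold pvPower
  rw [PySem.List.pyRange_one]
  rw [List.foldl_map]
  simp only [Int.sub_zero]
  induction e.toNat with
  | zero => simp [pvPw]
  | succ n ih => rw [List.range_succ, List.foldl_append]; simp [pvPw, ih]

lemma pvPowers_eq (p : List Int) (k : Int) :
    pvPowers p k = (List.range k.toNat).map (fun j => pvPw p (j + 1)) := by
  unfold pvPowers
  rw [PySem.List.pyRange_one, List.foldl_map]
  simp only [Int.sub_zero]
  suffices h : ∀ n : Nat,
      (List.range n).foldl
        (fun (st : List (List Int) × List Int) _ =>
          let q := pvMul st.2 p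
          (st.1 ++ [q], q)) ([], [1, 0])
      = ((List.range n).map (fun j => pvPw p (j + 1)), pvPw p n) by
    rw [h]
  intro n
  induction n with
  | zero => simp [pvPw]
  | succ n ih =>
      rw [List.range_succ, List.foldl_append, ih]
      simp [pvPw]

-- A's inner two loops build exactly B's flatMap block
lemma inner_eq (div : List (List Int)) (p : List Int) (k : Int) :
    div.foldl (fun u d =>
        (PySem.List.pyRange 1 (k + 1) 1).foldl
          (fun u e => u ++ [pvMul d (pvPower p e)]) u) []
    = div.flatMap (fun d => (pvPowers p k).map (fun q => pvMul d q)) := by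
  have hd : ∀ (d : List Int) (u : List (List Int)),
      (PySem.List.pyRange 1 (k + 1) 1).foldl
        (fun u e => u ++ [pvMul d (pvPower p e)]) u
      = u ++ (pvPowers p k).map (fun q => pvMul d q) := by
    intro d u
    rw [PySem.List.foldl_append_singleton_eq_map]
    rw [PySem.List.pyRange_one, List.map_map, pvPowers_eq, List.map_map]
    congr 1
    rw [show (k + 1 - 1 : Int) = k from by ring]
    apply List.map_congr_left
    intro j hj
    simp only [Function.comp_apply]
    rw [pvPower_eq, show ((1 : Int) + (j : Int)).toNat = j + 1 from by omega]
  induction div using List.reverseRecOn with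
  | nil => simp
  | append_singleton ds d ih =>
      rw [List.foldl_append, List.flatMap_append, ← ih]
      simp [hd]

-- index-loop over range(len P) reading P[i], v[i] = fold over zip, when v is long enough
lemma idx_fold_eq_zip_fold {γ : Type} (g : γ → List Int → Int → γ) :
    ∀ (P : List (List Int)) (v : List Int) (c : γ), P.length ≤ v.length →
      (List.range P.length).foldl (fun acc j => g acc (P.getD j []) (v.getD j 0)) c
      = (P.zip v).foldl (fun acc pk => g acc pk.1 pk.2) c := by
  intro P
  induction P with
  | nil => intro v c _; simp
  | cons p P' ih =>
      intro v c h
      cases v with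
      | nil => simp at h
      | cons k v' =>
          rw [List.length_cons, List.range_succ_eq_map, List.foldl_cons, List.foldl_map]
          simp only [List.getD_cons_zero, List.getD_cons_succ]
          rw [ih v' (g c p k) (by simpa using h)]
          simp [List.zip_cons_cons]

theorem Gdivisors_spec : Claim_equal_Gdivisors := by
  intro P v _ hpre
  unfold Spec_Gdivisors Gdivisors Gdivisors_alt
  rw [show ((P.length : Int)) = ((P.length : Int)) from rfl]
  rw [PySem.List.pyRange_one]
  rw [List.foldl_map]
  simp only [Int.sub_zero, Int.toNat_natCast]
  have hstep :
      (fun (div : List (List Int)) (j : Nat) =>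
        let p := PySem.List.pyGetD P ((0 : Int) + j) []
        let u := div.foldl (fun u d =>
          (PySem.List.pyRange 1 (PySem.List.pyGetD v ((0 : Int) + j) 0 + 1) 1).foldl
            (fun u e => u ++ [pvMul d (pvPower p e)]) u) []
        div ++ u)
      = fun (div : List (List Int)) (j : Nat) =>
          div ++ div.flatMap (fun d =>
            (pvPowers (P.getD j []) (v.getD j 0)).map (fun q => pvMul d q)) := by
    funext div j
    simp only [Int.zero_add, PySem.List.pyGetD_natCast]
    rw [inner_eq]
  rw [hstep]
  exact idx_fold_eq_zip_fold
    (fun div p k => div ++ div.flatMap (fun d => (pvPowers p k).map (fun q => pvMul d q)))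
    P v [[1, 0]] hpre.1
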